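-- pv_equiv track=rewrite | github.com/Thongheng/RedSploit | redsploit/workflow/adapters/nuclei.py | _match_finding_to_target
-- ===== SOURCE A (Python) =====
-- from typing import Any
--
-- def _match_finding_to_target(finding: dict[str, Any], targets: list[str]) -> str | None:
--     matched = finding.get("matched_at") or finding.get("host") or ""
--     if not isinstance(matched, str) or not matched:
--         return None
--
--     for target in targets:
--         if matched == target:
--             return target
--
--     normalized = matched.rstrip("/")
--     prefix_matches = [
--         target for target in targets
--         if normalized == target.rstrip("/") or normalized.startswith(f"{target.rstrip('/')}/")
--     ]
--     if not prefix_matches: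
--         return None
--     return max(prefix_matches, key=len)
-- ===== SOURCE B (Python) =====
-- def _match_finding_to_target(finding, targets):
--     matched = finding.get("matched_at") or finding.get("host") or ""
--     if not isinstance(matched, str) or not matched:
--         return None
--     if matched in targets:
--         return matched
--     normalized = matched.rstrip("/")
--     # Sort targets by length, longest first (stable), and return the FIRST
--     # prefix-matching one: that is exactly max-by-len with first-of-ties,
--     # since stable reverse sorting keeps equal-length targets in original order.
--     for target in sorted(targets, key=len, reverse=True):
--         t = target.rstrip("/")
--         if normalized == t or normalized.startswith(t + "/"):
--             return target
--     return None
-- ===== Notes on version B (the rewrite author's own statement) =====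
-- stated objective: alternative
-- what changed: A's filter-comprehension followed by max(key=len) is replaced by a sort-then-scan: B stably sorts targets by length descending and returns the first prefix-matching target (and replaces A's exact-match scan loop by a membership test, returning matched itself).
import Mathlib
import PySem

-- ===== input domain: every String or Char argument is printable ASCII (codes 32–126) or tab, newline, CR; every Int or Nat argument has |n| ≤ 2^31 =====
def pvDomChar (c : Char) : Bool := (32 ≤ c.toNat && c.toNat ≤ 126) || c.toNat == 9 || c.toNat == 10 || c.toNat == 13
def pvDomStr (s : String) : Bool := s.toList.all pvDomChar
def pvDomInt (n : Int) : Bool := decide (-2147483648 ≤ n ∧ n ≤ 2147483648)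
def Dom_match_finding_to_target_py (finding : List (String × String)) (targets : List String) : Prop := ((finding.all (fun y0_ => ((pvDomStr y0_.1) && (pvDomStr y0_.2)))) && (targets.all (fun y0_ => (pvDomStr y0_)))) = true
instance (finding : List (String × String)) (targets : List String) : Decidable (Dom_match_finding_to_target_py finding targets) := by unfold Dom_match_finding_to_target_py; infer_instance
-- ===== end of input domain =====

-- B replaces A's filter-comprehension + max(key=len) by a sort-then-scan (stable sort by
-- length descending, return the first prefix match), and A's exact-match scan by a membership
-- test; alternative decomposition, same return value.
-- Shared by both ports: Python's `s.rstrip("/")` (drop trailing '/' characters); PySem has no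
-- rstrip-with-argument, so this is a hand port, exact on all inputs.
def pvRstripSlash (cs : List Char) : List Char := (cs.reverse.dropWhile (fun c => c == '/')).reverse

-- Shared by both ports: Python's `x or y` on an optional string (dict.get result): '' and None are falsy.
def pvOrStr (a : Option String) (b : String) : String :=
  match a with
  | some s => if s.toList = [] then b else s
  | none => b

-- The prefix-match condition, the identical expression in both sources:
-- normalized == target.rstrip('/') or normalized.startswith(target.rstrip('/') + '/')
def pvPrefixMatch (normalized : List Char) (target : String) : Bool :=
  (normalized == pvRstripSlash target.toList) || PySem.Chars.startswith normalized (pvRstripSlash target.toList ++ ['/'])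

-- ===== PORT A =====
-- A's first loop: `for target in targets: if matched == target: return target`
def pvFindExact (matched : String) : List String → Option String
  | [] => none
  | t :: ts => if matched.toList = t.toList then some t else pvFindExact matched ts

def match_finding_to_target_py (finding : List (String × String)) (targets : List String) : Option String :=
  let matched := pvOrStr (finding.lookup "matched_at") (pvOrStr (finding.lookup "host") "")
  if matched.toList = [] then none
  else
    match pvFindExact matched targets with
    | some t => some t
    | none =>
      let normalized := pvRstripSlash matched.toList
      let prefixMatches := targets.filter (fun t => pvPrefixMatch normalized t)
      if prefixMatches = [] then none
      else PySem.List.max? prefixMatches (fun t => PySem.Str.len t)   -- max(prefix_matches, key=len)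

-- ===== PORT B =====
-- B: membership test, then first prefix match in the length-descending stable sort.
def match_finding_to_target_py_alt (finding : List (String × String)) (targets : List String) : Option String :=
  let matched := pvOrStr (finding.lookup "matched_at") (pvOrStr (finding.lookup "host") "")
  if matched.toList = [] then none
  else if matched ∈ targets then some matched           -- `if matched in targets: return matched`
  else
    let normalized := pvRstripSlash matched.toList
    -- `for target in sorted(targets, key=len, reverse=True): if <match>: return target`
    List.find? (fun t => pvPrefixMatch normalized t)
      (PySem.List.sorted targets (fun t => PySem.Str.len t) true)

-- ===== PRECONDITION & SPEC =====
def Spec_match_finding_to_target_py (finding : List (String × String)) (targets : List String) (out : Option String) : Prop := out = match_finding_to_target_py_alt finding targets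
instance (finding : List (String × String)) (targets : List String) (out : Option String) : Decidable (Spec_match_finding_to_target_py finding targets out) := by unfold Spec_match_finding_to_target_py; infer_instance

-- ===== CLAIM (what is proved, stated in full; the proofs are below) =====
def Claim_equal_match_finding_to_target_py : Prop := ∀ (finding : List (String × String)) (targets : List String), Dom_match_finding_to_target_py finding targets → Spec_match_finding_to_target_py finding targets (match_finding_to_target_py finding targets)

-- ===== LEMMAS AND PROOFS =====

-- A's exact-match loop returns `matched` itself exactly when matched is in targets.
theorem pvFindExact_eq (matched : String) (ts : List String) :
    pvFindExact matched ts = if matched ∈ ts then some matched else none := by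
  induction ts with
  | nil => simp [pvFindExact]
  | cons t ts ih =>
    by_cases h : matched.toList = t.toList
    · have he : matched = t := String.toList_inj.mp h
      simp [pvFindExact, he]
    · have hne : matched ≠ t := fun he => h (he ▸ rfl)
      simp [pvFindExact, h, ih, hne]

-- Inserting x into a length-descending list: the first p-element of the result,
-- expressed through the first p-element of the old list (a running max step).
theorem find?_insertBy {α κ : Type} [LinearOrder κ] (p : α → Bool) (key : α → κ) (x : α) :
    ∀ S : List α, S.Pairwise (fun a b => key b ≤ key a) →
    List.find? p (PySem.List.insertBy (fun a b => decide (key b < key a)) x S) =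
      (match List.find? p S with
       | none => if p x then some x else none
       | some y => if key y < key x then (if p x then some x else some y) else some y) := by
  intro S
  induction S with
  | nil => intro _; simp [PySem.List.insertBy]
  | cons t ts ih =>
    intro hp
    have htail := (List.pairwise_cons.mp hp).2
    have hhead := (List.pairwise_cons.mp hp).1
    by_cases hb : key t < key x
    · -- x is inserted in front of t
      simp only [PySem.List.insertBy, hb, decide_true, if_true]
      cases hr : List.find? p (t :: ts) with
      | none =>
        by_cases hpx : p x <;> simp [hpx, hr]
      | some y =>
        have hy := List.mem_of_find?_eq_some hr
        have hky : key y ≤ key t := by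
          rcases List.mem_cons.mp hy with h | h
          · exact h ▸ le_rfl
          · exact hhead y h
        have hyx : key y < key x := lt_of_le_of_lt hky hb
        by_cases hpx : p x <;> simp [hpx, hr, hyx]
    · -- key x ≤ key t: x goes after t
      simp only [PySem.List.insertBy, hb, decide_false, Bool.false_eq_true, if_false]
      by_cases hpt : p t
      · simp [hpt, hb]
      · simp [hpt, ih htail]

-- The heart of the equivalence: the first p-element of the length-descending stable sort
-- IS Python's max(filter(p, ts), key), first-of-ties included.
theorem find?_sorted_rev_eq_max?_filter {α κ : Type} [LinearOrder κ] (p : α → Bool) (key : α → κ)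
    (ts : List α) :
    List.find? p (PySem.List.sorted ts key true) = PySem.List.max? (ts.filter p) key := by
  induction ts using List.reverseRecOn with
  | nil => simp [PySem.List.sorted, PySem.List.max?]
  | append_singleton ts x ih =>
    have hsort : PySem.List.sorted (ts ++ [x]) key true =
        PySem.List.insertBy (fun a b => decide (key b < key a)) x (PySem.List.sorted ts key true) := by
      rw [PySem.List.sorted_rev_eq_foldl_insertBy, PySem.List.sorted_rev_eq_foldl_insertBy,
        List.foldl_append]
      rfl
    have hmax : ∀ l : List α, PySem.List.max? (l ++ [x]) key =
        (match PySem.List.max? l key with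
         | none => some x
         | some m => if key m < key x then some x else some m) := by
      intro l
      unfold PySem.List.max?
      rw [List.foldl_append]
      simp only [List.foldl_cons, List.foldl_nil]
      rfl
    rw [hsort, find?_insertBy p key x _ (PySem.List.sorted_pairwise_rev ts key),
      List.filter_append, ih]
    by_cases hpx : p x
    · simp only [List.filter_cons, List.filter_nil, hpx, if_true, hmax]
    · simp only [List.filter_cons, List.filter_nil, hpx, Bool.false_eq_true, if_false,
        List.append_nil]
      cases PySem.List.max? (List.filter p ts) key with
      | none => simp
      | some y => by_cases h : key y < key x <;> simp [h]

-- A's whole prefix branch (empty-check + max?) is just max? of the filtered list.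
theorem max?_filter_eq_branch (p : String → Bool) (ts : List String) :
    (if ts.filter p = [] then none
     else PySem.List.max? (ts.filter p) (fun t => PySem.Str.len t)) =
      PySem.List.max? (ts.filter p) (fun t => PySem.Str.len t) := by
  by_cases h : ts.filter p = [] <;> simp [h, PySem.List.max?]

-- ===== VERDICT (by name: the statement is the Claim_ definition above) =====
theorem match_finding_to_target_py_spec : Claim_equal_match_finding_to_target_py := by
  intro finding targets _
  unfold Spec_match_finding_to_target_py
  unfold match_finding_to_target_py match_finding_to_target_py_alt
  set matched := pvOrStr (finding.lookup "matched_at") (pvOrStr (finding.lookup "host") "") with hm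
  by_cases h0 : matched.toList = []
  · simp [h0]
  · simp only [h0, if_false]
    rw [pvFindExact_eq]
    by_cases hmem : matched ∈ targets
    · simp [hmem]
    · simp only [hmem, if_false]
      rw [max?_filter_eq_branch, find?_sorted_rev_eq_max?_filter]
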